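-- pv_equiv track=rewrite | github.com/higarin/python-99 | P27/main.py | search_group
-- ===== SOURCE A (Python) =====
-- def search_group(size, condition, elements, last_index=0):
--     if elements.count(-1) == 0:
--         return [elements]
--
--     ret = []
--     for i in range(last_index, size):
--         for group_idx in range(0, len(condition)):
--             work = elements.copy()
--             work[i] = group_idx
--             if work.count(group_idx) <= condition[group_idx]:
--                 ret.extend(search_group(size, condition, work, i + 1))
--
--     return ret
-- ===== SOURCE B (Python) =====
-- def search_group(size, condition, elements, last_index=0):
--     # Iterative DFS with an explicit stack; children pushed in reverse so the
--     # LIFO pop order reproduces the recursive left-to-right emission order.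
--     ret = []
--     stack = [(elements, last_index)]
--     while stack:
--         elems, li = stack.pop()
--         if elems.count(-1) == 0:
--             ret.append(elems)
--             continue
--         for i in range(size - 1, li - 1, -1):
--             for g in range(len(condition) - 1, -1, -1):
--                 work = elems.copy()
--                 work[i] = g
--                 if work.count(g) <= condition[g]:
--                     stack.append((work, i + 1))
--     return ret
-- ===== Notes on version B (the rewrite author's own statement) =====
-- stated objective: alternative
-- what changed: Replaced A's recursive DFS by an iterative DFS over an explicit stack of (elements, last_index) frames with reverse-order pushes so the LIFO pop order reproduces A's left-to-right emission order.
import Mathlib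
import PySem

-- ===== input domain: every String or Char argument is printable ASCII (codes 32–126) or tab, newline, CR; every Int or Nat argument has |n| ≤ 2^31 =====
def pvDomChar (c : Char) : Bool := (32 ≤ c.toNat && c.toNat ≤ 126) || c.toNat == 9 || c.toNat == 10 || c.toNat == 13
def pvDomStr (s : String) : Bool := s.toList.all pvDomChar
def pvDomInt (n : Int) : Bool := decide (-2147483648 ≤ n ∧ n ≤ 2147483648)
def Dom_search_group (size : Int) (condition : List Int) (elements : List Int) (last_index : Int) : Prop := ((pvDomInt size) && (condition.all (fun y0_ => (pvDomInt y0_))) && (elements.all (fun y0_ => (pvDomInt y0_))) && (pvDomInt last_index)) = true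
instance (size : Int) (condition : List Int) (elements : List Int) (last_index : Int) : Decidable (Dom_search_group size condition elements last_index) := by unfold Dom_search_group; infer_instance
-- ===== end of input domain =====

-- B replaces A's recursive DFS by an iterative DFS over an explicit stack of
-- (elements, last_index) frames, children pushed in reverse to keep A's order;
-- objective: alternative decomposition, same cost.

-- ===== PORT A =====
-- Literal port of A's recursion: the nested 'for' loops that extend 'ret'
-- become nested flatMaps; 'work[i] = group_idx' is pySet? (none = IndexError,
-- excluded by Pre_, that branch contributes nothing); attach only carries the
-- range membership needed for termination.
def search_group (size : Int) (condition : List Int) (elements : List Int) (last_index : Int) : List (List Int) :=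
  if elements.count (-1) = 0 then [elements]
  else
    (PySem.List.pyRange last_index size 1).attach.flatMap (fun x =>
      (PySem.List.pyRange 0 (condition.length : Int) 1).flatMap (fun g =>
        match PySem.List.pySet? elements x.1 g with
        | none => []
        | some work =>
          if (work.count g : Int) ≤ PySem.List.pyGetD condition g 0
          then search_group size condition work (x.1 + 1)
          else []))
termination_by (size - last_index).toNat
decreasing_by
  have h := (PySem.List.mem_pyRange_one).1 x.2
  omega

-- ===== PORT B =====
-- The frames Source B pushes while popping (elems, li): Source B pushes them in
-- DECREASING (i, g) order, so on the LIFO stack (modeled head = top) they sit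
-- in increasing order; prepending this in-order list is exactly those pushes.
def sgChildren (size : Int) (condition : List Int) (elems : List Int) (li : Int) : List (List Int × Int) :=
  (PySem.List.pyRange li size 1).flatMap (fun i =>
    (PySem.List.pyRange 0 (condition.length : Int) 1).filterMap (fun g =>
      match PySem.List.pySet? elems i g with
      | none => none
      | some work =>
        if (work.count g : Int) ≤ PySem.List.pyGetD condition g 0
        then some (work, i + 1) else none))

-- termination measure for the stack loop (proof artefact, not part of Source B)
def sgMeas (size : Int) (C : Nat) (stack : List (List Int × Int)) : Nat :=
  (stack.map (fun p => (C + 2) ^ (size - p.2).toNat)).sum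

-- cited by sgLoop's decreasing_by, hence above the claim block
lemma sgMeas_children_lt (size : Int) (condition : List Int) (elems : List Int) (li : Int) :
    sgMeas size condition.length (sgChildren size condition elems li)
      < (condition.length + 2) ^ (size - li).toNat := by
  suffices h : ∀ n (li : Int), (size - li).toNat ≤ n →
      sgMeas size condition.length (sgChildren size condition elems li)
        < (condition.length + 2) ^ (size - li).toNat from h _ li le_rfl
  intro n
  induction n with
  | zero =>
    intro li hle
    have hba : size ≤ li := by omega
    simp [sgChildren, PySem.List.pyRange_one_eq_nil hba, sgMeas]
  | succ n ih =>
    intro li hle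
    by_cases hba : size ≤ li
    · simp [sgChildren, PySem.List.pyRange_one_eq_nil hba, sgMeas]
    · have hlt : li < size := by omega
      have hk : (size - li).toNat = (size - (li + 1)).toNat + 1 := by omega
      rw [sgChildren, PySem.List.pyRange_one_cons hlt, List.flatMap_cons]
      set inner := (PySem.List.pyRange 0 (condition.length : Int) 1).filterMap (fun g =>
          match PySem.List.pySet? elems li g with
          | none => none
          | some work =>
            if (work.count g : Int) ≤ PySem.List.pyGetD condition g 0
            then some (work, li + 1) else none) with hinnerdef
      have hrec : (PySem.List.pyRange (li + 1) size 1).flatMap (fun i =>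
          (PySem.List.pyRange 0 (condition.length : Int) 1).filterMap (fun g =>
            match PySem.List.pySet? elems i g with
            | none => none
            | some work =>
              if (work.count g : Int) ≤ PySem.List.pyGetD condition g 0
              then some (work, i + 1) else none)) = sgChildren size condition elems (li + 1) := by
        rw [sgChildren]
      rw [hrec]
      have hsnd : ∀ p ∈ inner, p.2 = li + 1 := by
        intro p hp
        rw [hinnerdef, List.mem_filterMap] at hp
        obtain ⟨g, _, hg⟩ := hp
        split at hg
        · cases hg
        · split at hg
          · cases hg; rfl
          · cases hg
      have hlen : inner.length ≤ condition.length := by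
        calc inner.length ≤ (PySem.List.pyRange 0 (condition.length : Int) 1).length :=
              List.length_filterMap_le _ _
          _ = condition.length := by
              rw [PySem.List.length_pyRange_one]; omega
      have hinner : sgMeas size condition.length inner
          ≤ condition.length * (condition.length + 2) ^ (size - (li + 1)).toNat := by
        unfold sgMeas
        have hmap : inner.map (fun p => (condition.length + 2) ^ (size - p.2).toNat)
            = inner.map (fun _ => (condition.length + 2) ^ (size - (li + 1)).toNat) :=
          List.map_congr_left (fun p hp => by rw [hsnd p hp])
        rw [hmap, List.map_const', List.sum_replicate, smul_eq_mul]
        exact Nat.mul_le_mul_right _ hlen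
      have hrest := ih (li + 1) (by omega)
      have hsplit : sgMeas size condition.length
          (inner ++ sgChildren size condition elems (li + 1))
          = sgMeas size condition.length inner
            + sgMeas size condition.length (sgChildren size condition elems (li + 1)) := by
        simp [sgMeas]
      rw [hsplit, hk, pow_succ]
      nlinarith [hinner, hrest]

-- Source B's while loop: pop (= head), emit or prepend the in-order child frames.
def sgLoop (size : Int) (condition : List Int) (acc : List (List Int)) (stack : List (List Int × Int)) : List (List Int) :=
  match stack with
  | [] => acc
  | (elems, li) :: rest =>
    if elems.count (-1) = 0 then
      sgLoop size condition (acc ++ [elems]) rest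
    else
      sgLoop size condition acc (sgChildren size condition elems li ++ rest)
termination_by sgMeas size condition.length stack
decreasing_by
  all_goals simp only [sgMeas, List.map_append, List.sum_append, List.map_cons, List.sum_cons]
  · have hp : 0 < (condition.length + 2) ^ (size - li).toNat := Nat.pow_pos (by omega)
    omega
  · have h := sgMeas_children_lt size condition elems li
    simp only [sgMeas] at h
    omega

def search_group_alt (size : Int) (condition : List Int) (elements : List Int) (last_index : Int) : List (List Int) :=
  sgLoop size condition [] [(elements, last_index)]

-- ===== PRECONDITION & SPEC =====
-- Exactly the inputs where Python A returns (no IndexError): either no -1 is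
-- left, or the index range is empty, or every i in [last_index, size) is a
-- valid (possibly negative) index into elements.
def Pre_search_group (size : Int) (condition : List Int) (elements : List Int) (last_index : Int) : Prop :=
  elements.count (-1) = 0 ∨ size ≤ last_index ∨
    (-(elements.length : Int) ≤ last_index ∧ size ≤ (elements.length : Int))
instance (size : Int) (condition : List Int) (elements : List Int) (last_index : Int) : Decidable (Pre_search_group size condition elements last_index) := by unfold Pre_search_group; infer_instance

def pvWitness_search_group : Int × List Int × List Int × Int := (2, [2, 1], [-1, -1], 0)

def Spec_search_group (size : Int) (condition : List Int) (elements : List Int) (last_index : Int) (out : List (List Int)) : Prop := out = search_group_alt size condition elements last_index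
instance (size : Int) (condition : List Int) (elements : List Int) (last_index : Int) (out : List (List Int)) : Decidable (Spec_search_group size condition elements last_index out) := by unfold Spec_search_group; infer_instance

-- ===== CLAIM (what is proved, stated in full; the proofs are below) =====
def Claim_equal_search_group : Prop := ∀ (size : Int) (condition : List Int) (elements : List Int) (last_index : Int), Dom_search_group size condition elements last_index → Pre_search_group size condition elements last_index → Spec_search_group size condition elements last_index (search_group size condition elements last_index)

-- ===== LEMMAS AND PROOFS =====

-- A's body with the 'attach' (termination bookkeeping) removed
lemma search_group_of_count_ne (size : Int) (condition : List Int) (elements : List Int)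
    (last_index : Int) (h : ¬ elements.count (-1) = 0) :
    search_group size condition elements last_index
      = (PySem.List.pyRange last_index size 1).flatMap (fun i =>
          (PySem.List.pyRange 0 (condition.length : Int) 1).flatMap (fun g =>
            match PySem.List.pySet? elements i g with
            | none => []
            | some work =>
              if (work.count g : Int) ≤ PySem.List.pyGetD condition g 0
              then search_group size condition work (i + 1)
              else [])) := by
  rw [search_group, if_neg h]
  conv_rhs => rw [← List.attach_map_subtype_val (PySem.List.pyRange last_index size 1)]
  rw [List.flatMap_map]

lemma flatMap_filterMap_match {α β γ : Type} (h : α → Option β) (f : β → List γ) (l : List α) :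
    (l.filterMap h).flatMap f
      = l.flatMap (fun a => match h a with | none => [] | some b => f b) := by
  induction l with
  | nil => rfl
  | cons a l ih =>
    rw [List.filterMap_cons]
    cases ha : h a
    · rw [List.flatMap_cons, ha, List.nil_append, ih]
    · rw [List.flatMap_cons, List.flatMap_cons, ha, ih]

-- running A on every child frame reproduces A's recursive case
lemma flatMap_sgChildren (size : Int) (condition : List Int) (elems : List Int) (li : Int)
    (h : ¬ elems.count (-1) = 0) :
    (sgChildren size condition elems li).flatMap
        (fun p => search_group size condition p.1 p.2)
      = search_group size condition elems li := by
  rw [search_group_of_count_ne size condition elems li h, sgChildren, List.flatMap_assoc]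
  refine congrArg (fun f => List.flatMap f _) (funext fun i => ?_)
  rw [flatMap_filterMap_match]
  refine congrArg (fun f => List.flatMap f _) (funext fun g => ?_)
  cases hset : PySem.List.pySet? elems i g with
  | none => rfl
  | some w =>
    dsimp only
    split_ifs with hc <;> rfl

-- loop invariant: the stack loop appends, to acc, A's result for every frame
lemma sgLoop_eq (size : Int) (condition : List Int) (acc : List (List Int))
    (stack : List (List Int × Int)) :
    sgLoop size condition acc stack
      = acc ++ stack.flatMap (fun p => search_group size condition p.1 p.2) := by
  fun_induction sgLoop size condition acc stack with
  | case1 acc => simp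
  | case2 acc elems li rest h ih =>
    have h0 : search_group size condition elems li = [elems] := by
      rw [search_group, if_pos h]
    rw [ih, List.flatMap_cons, h0, List.append_assoc]
  | case3 acc elems li rest h ih =>
    rw [ih, List.flatMap_append, flatMap_sgChildren size condition elems li h,
      List.flatMap_cons]

-- ===== VERDICT (by name: the statement is the Claim_ definition above) =====
theorem search_group_spec : Claim_equal_search_group := by
  intro size condition elements last_index _ _
  unfold Spec_search_group search_group_alt
  rw [sgLoop_eq, List.flatMap_cons, List.flatMap_nil, List.nil_append, List.append_nil]
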